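-- pv_equiv track=rewrite | github.com/Libre-SOC-mirrors/openpower-isa | src/openpower/test/bitmanip/bitmanip_cases.py | crfbinlog
-- ===== SOURCE A (Python) =====
-- def crfbinlog(bf, bfa, bfb, mask):
--     lut = bfb
--     expected = bf&~mask # start at BF, mask overwrites masked bits only
--     checks = (bfa, bf) # LUT positions 1<<0=bfa 1<<1=bf
--     for i in range(4):
--         lut_index = 0
--         for j, check in enumerate(checks):
--             if check & (1<<i):
--                 lut_index |= 1<<j
--         maskbit = (mask >> i) & 0b1
--         if (lut & (1<<lut_index)) and maskbit:
--             expected |= 1<<i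
--     return expected
-- ===== SOURCE B (Python) =====
-- def crfbinlog(bf, bfa, bfb, mask):
--     # Bit-parallel: coverage mask per LUT entry, no per-bit-position loop.
--     lutmasks = (~bf & ~bfa, ~bf & bfa, bf & ~bfa, bf & bfa)
--     result = 0
--     for k in range(4):
--         if bfb & (1 << k):
--             result |= lutmasks[k] & 0xF
--     return (bf & ~mask) | (result & mask)
-- ===== Notes on version B (the rewrite author's own statement) =====
-- stated objective: alternative
-- what changed: Replaces the per-bit-position loop with its inner enumerate loop computing a LUT index for each of the 4 bits by a bit-parallel computation: four coverage masks (one per LUT entry) derived from bf/bfa by bitwise logic are OR-ed together for the LUT entries set in bfb, then combined with the base via (bf & ~mask) | (result & mask).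
import Mathlib
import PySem

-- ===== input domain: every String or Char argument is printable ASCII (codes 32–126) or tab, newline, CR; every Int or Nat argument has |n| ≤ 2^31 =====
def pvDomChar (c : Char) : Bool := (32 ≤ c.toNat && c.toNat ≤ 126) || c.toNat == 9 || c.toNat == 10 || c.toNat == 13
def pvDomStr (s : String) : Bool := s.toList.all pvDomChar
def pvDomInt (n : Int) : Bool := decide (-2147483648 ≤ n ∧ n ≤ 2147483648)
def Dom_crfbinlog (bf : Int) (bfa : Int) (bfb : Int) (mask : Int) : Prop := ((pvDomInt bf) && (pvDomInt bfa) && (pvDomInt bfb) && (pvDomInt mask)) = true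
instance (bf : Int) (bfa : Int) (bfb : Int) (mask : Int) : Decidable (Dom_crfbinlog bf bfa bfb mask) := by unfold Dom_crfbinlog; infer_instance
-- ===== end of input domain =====

-- B computes all four result bits at once from per-LUT-entry coverage masks instead of looping over bit positions with per-bit LUT indexing (objective: alternative).

-- ===== PORT A =====
-- literal transliteration of A: outer loop over bit positions 0..3, inner enumerate loop building the LUT index
def crfbinlog (bf : Int) (bfa : Int) (bfb : Int) (mask : Int) : Int :=
  let lut := bfb
  let expected := PySem.Int.band bf (Int.not mask)
  let checks : List Int := [bfa, bf]
  (PySem.List.pyRange 0 4 1).foldl (fun expected i =>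
    let lutIndex : Int := (PySem.List.enumerate checks 0).foldl
      (fun lutIndex jc =>
        if PySem.Int.band jc.2 ((1 : Int) <<< i.toNat) ≠ 0 then
          PySem.Int.bor lutIndex ((1 : Int) <<< jc.1.toNat)
        else lutIndex) 0
    let maskbit := PySem.Int.band (mask >>> i.toNat) 1
    if PySem.Int.band lut ((1 : Int) <<< lutIndex.toNat) ≠ 0 ∧ maskbit ≠ 0 then
      PySem.Int.bor expected ((1 : Int) <<< i.toNat)
    else expected) expected
-- ===== PORT B =====
-- literal transliteration of B: per-LUT-entry coverage masks OR-ed in bit-parallel when the LUT has that entry set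
def crfbinlog_alt (bf : Int) (bfa : Int) (bfb : Int) (mask : Int) : Int :=
  let lutmasks : List Int := [PySem.Int.band (Int.not bf) (Int.not bfa),
                              PySem.Int.band (Int.not bf) bfa,
                              PySem.Int.band bf (Int.not bfa),
                              PySem.Int.band bf bfa]
  let result := (PySem.List.pyRange 0 4 1).foldl (fun result k =>
    if PySem.Int.band bfb ((1 : Int) <<< k.toNat) ≠ 0 then
      PySem.Int.bor result (PySem.Int.band ((PySem.List.pyGet? lutmasks k).getD 0) 15)
    else result) 0
  PySem.Int.bor (PySem.Int.band bf (Int.not mask)) (PySem.Int.band result mask)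
-- ===== PRECONDITION & SPEC =====
def Spec_crfbinlog (bf : Int) (bfa : Int) (bfb : Int) (mask : Int) (out : Int) : Prop := out = crfbinlog_alt bf bfa bfb mask
instance (bf : Int) (bfa : Int) (bfb : Int) (mask : Int) (out : Int) : Decidable (Spec_crfbinlog bf bfa bfb mask out) := by unfold Spec_crfbinlog; infer_instance

-- ===== CLAIM (what is proved, stated in full; the proofs are below) =====
def Claim_equal_crfbinlog : Prop := ∀ (bf : Int) (bfa : Int) (bfb : Int) (mask : Int), Dom_crfbinlog bf bfa bfb mask → Spec_crfbinlog bf bfa bfb mask (crfbinlog bf bfa bfb mask)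

-- ===== LEMMAS AND PROOFS =====
theorem pv_and_add_ldiff (m n : Nat) : (m &&& n) + Nat.ldiff m n = m := by
  induction m using Nat.binaryRec generalizing n with
  | zero => simp [Nat.ldiff, Nat.bitwise_zero_left]
  | bit b m ih =>
    rw [← Nat.bit_bodd_div2 n]
    simp only [Nat.land_bit, Nat.ldiff_bit]
    have h := ih n.div2
    cases b <;> cases Nat.bodd n <;>
      simp only [Nat.bit_false, Nat.bit_true, Bool.and_false, Bool.and_true,
        Bool.not_false, Bool.not_true] <;> omega
theorem pv_sub_and (m n : Nat) : m - (m &&& n) = Nat.ldiff m n := by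
  have h := pv_and_add_ldiff m n
  omega
theorem pv_tb_negOfNat (n : Nat) (k : Nat) : (-(n : Int) - 1).testBit k = !(n.testBit k) := by
  have h : (-(n : Int) - 1) = Int.negSucc n := by
    rw [Int.negSucc_eq]; ring
  rw [h]
  rfl
theorem pv_tb_zero (k : Nat) : (0 : Int).testBit k = false := by
  rw [show ((0 : Int).testBit k) = Nat.testBit 0 k from rfl]
  exact Nat.zero_testBit k
theorem pv_tb_band (a b : Int) (k : Nat) :
    (PySem.Int.band a b).testBit k = (a.testBit k && b.testBit k) := by
  cases a with
  | ofNat m =>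
    cases b with
    | ofNat n => simp [PySem.Int.band, Int.testBit]
    | negSucc n =>
      have h2 : ¬ (0 : Int) ≤ Int.negSucc n := by simp
      have h3 : (-(Int.negSucc n) - 1).toNat = n := by omega
      simp only [PySem.Int.band, Int.le_refl, Int.ofNat_eq_coe, Int.toNat_natCast, h3,
        if_pos (Int.ofNat_nonneg m), if_neg h2, pv_sub_and]
      simp [Int.testBit, Nat.testBit_ldiff]
  | negSucc m =>
    have h2 : ¬ (0 : Int) ≤ Int.negSucc m := by simp
    have h3 : (-(Int.negSucc m) - 1).toNat = m := by omega
    cases b with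
    | ofNat n =>
      simp only [PySem.Int.band, if_neg h2, if_pos (Int.ofNat_nonneg n), Int.ofNat_eq_coe,
        Int.toNat_natCast, h3, pv_sub_and]
      simp [Int.testBit, Nat.testBit_ldiff, Bool.and_comm]
    | negSucc n =>
      have h4 : ¬ (0 : Int) ≤ Int.negSucc n := by simp
      have h5 : (-(Int.negSucc n) - 1).toNat = n := by omega
      simp only [PySem.Int.band, if_neg h2, if_neg h4, h3, h5]
      rw [pv_tb_negOfNat]
      simp [Int.testBit, Nat.testBit_or]
theorem pv_tb_bor (a b : Int) (k : Nat) :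
    (PySem.Int.bor a b).testBit k = (a.testBit k || b.testBit k) := by
  cases a with
  | ofNat m =>
    cases b with
    | ofNat n => simp [PySem.Int.bor, Int.testBit, Nat.testBit_or]
    | negSucc n =>
      have h2 : ¬ (0 : Int) ≤ Int.negSucc n := by simp
      have h3 : (-(Int.negSucc n) - 1).toNat = n := by omega
      simp only [PySem.Int.bor, if_pos (Int.natCast_nonneg m), if_neg h2, Int.ofNat_eq_natCast,
        Int.toNat_natCast, h3, pv_sub_and]
      rw [pv_tb_negOfNat]
      simp [Int.testBit, Nat.testBit_ldiff, Bool.or_comm]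
  | negSucc m =>
    have h2 : ¬ (0 : Int) ≤ Int.negSucc m := by simp
    have h3 : (-(Int.negSucc m) - 1).toNat = m := by omega
    cases b with
    | ofNat n =>
      simp only [PySem.Int.bor, if_neg h2, if_pos (Int.natCast_nonneg n), Int.ofNat_eq_natCast,
        Int.toNat_natCast, h3, pv_sub_and]
      rw [pv_tb_negOfNat]
      simp [Int.testBit, Nat.testBit_ldiff]
    | negSucc n =>
      have h4 : ¬ (0 : Int) ≤ Int.negSucc n := by simp
      have h5 : (-(Int.negSucc n) - 1).toNat = n := by omega
      simp only [PySem.Int.bor, if_neg h2, if_neg h4, h3, h5]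
      rw [pv_tb_negOfNat]
      simp [Int.testBit, Nat.testBit_and]
theorem pv_tb_not (a : Int) (k : Nat) : (Int.not a).testBit k = !(a.testBit k) := by
  cases a <;> simp [Int.not, Int.testBit]
theorem pv_int_ext {a b : Int} (h : ∀ k, a.testBit k = b.testBit k) : a = b := by
  cases a with
  | ofNat m =>
    cases b with
    | ofNat n =>
      have : m = n := Nat.eq_of_testBit_eq (fun i => by simpa [Int.testBit] using h i)
      simp [this]
    | negSucc n =>
      exfalso
      have hk := h (m + n)
      have hm : m.testBit (m + n) = false :=
        Nat.testBit_lt_two_pow (lt_of_lt_of_le Nat.lt_two_pow_self (Nat.pow_le_pow_right (by norm_num) (by omega)))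
      have hn : n.testBit (m + n) = false :=
        Nat.testBit_lt_two_pow (lt_of_lt_of_le Nat.lt_two_pow_self (Nat.pow_le_pow_right (by norm_num) (by omega)))
      simp [Int.testBit, hm, hn] at hk
  | negSucc m =>
    cases b with
    | ofNat n =>
      exfalso
      have hk := h (m + n)
      have hm : m.testBit (m + n) = false :=
        Nat.testBit_lt_two_pow (lt_of_lt_of_le Nat.lt_two_pow_self (Nat.pow_le_pow_right (by norm_num) (by omega)))
      have hn : n.testBit (m + n) = false :=
        Nat.testBit_lt_two_pow (lt_of_lt_of_le Nat.lt_two_pow_self (Nat.pow_le_pow_right (by norm_num) (by omega)))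
      simp [Int.testBit, hm, hn] at hk
    | negSucc n =>
      have : m = n := Nat.eq_of_testBit_eq (fun i => by simpa [Int.testBit] using h i)
      simp [this]
theorem pv_tb_one_shl (i k : Nat) : ((1 : Int) <<< i).testBit k = decide (i = k) := by
  have h : ((1 : Int) <<< i) = Int.ofNat (1 <<< i) := rfl
  rw [h]
  simp [Int.testBit, Nat.shiftLeft_eq, Nat.testBit_two_pow]
theorem pv_tb_one (k : Nat) : (1 : Int).testBit k = decide (0 = k) := by
  have h := pv_tb_one_shl 0 k
  simpa using h
theorem pv_band_pow2 (x : Int) (i : Nat) :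
    PySem.Int.band x ((1 : Int) <<< i) = if x.testBit i then (1 : Int) <<< i else 0 := by
  apply pv_int_ext
  intro k
  rw [pv_tb_band, apply_ite (fun y : Int => y.testBit k), pv_tb_one_shl, pv_tb_zero]
  by_cases h : x.testBit i <;> by_cases hik : i = k <;> simp [h, hik, pv_tb_one_shl]
theorem pv_band_pow2_ne (x : Int) (i : Nat) :
    (PySem.Int.band x ((1 : Int) <<< i) ≠ 0) ↔ x.testBit i = true := by
  have hpos : ((1 : Int) <<< i) ≠ 0 := by
    rw [show ((1 : Int) <<< i) = ((1 <<< i : Nat) : Int) from rfl, Nat.shiftLeft_eq, one_mul]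
    exact Int.natCast_ne_zero.mpr (Nat.pos_iff_ne_zero.mp (Nat.two_pow_pos i))
  rw [pv_band_pow2]
  by_cases h : x.testBit i <;> simp [h, hpos]
theorem pv_tb_shiftRight_zero (x : Int) (i : Nat) : (x >>> i).testBit 0 = x.testBit i := by
  have hn : ∀ m : Nat, (m >>> i).testBit 0 = m.testBit i := by
    intro m
    rw [Nat.testBit_shiftRight, Nat.add_zero]
  cases x with
  | ofNat m => exact hn m
  | negSucc m => exact congrArg (fun b => !b) (hn m)
theorem pv_maskbit_ne (x : Int) (i : Nat) :
    (PySem.Int.band (x >>> i) 1 ≠ 0) ↔ x.testBit i = true := by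
  have h1 : (1 : Int) = (1 : Int) <<< (0 : Nat) := rfl
  rw [h1, pv_band_pow2_ne, pv_tb_shiftRight_zero]
theorem pv_tb_fifteen (k : Nat) : (15 : Int).testBit k = decide (k < 4) := by
  match k with
  | 0 => decide
  | 1 => decide
  | 2 => decide
  | 3 => decide
  | (n+4) =>
    have h : (15 : Nat) < 2 ^ (n + 4) :=
      lt_of_lt_of_le (show (15 : Nat) < 2 ^ 4 by norm_num)
        (Nat.pow_le_pow_right (by norm_num) (by omega))
    have h2 : (15 : Int).testBit (n+4) = (15 : Nat).testBit (n+4) := rfl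
    simp [h2, Nat.testBit_lt_two_pow h]
theorem pv_main (bf bfa bfb mask : Int) :
    crfbinlog bf bfa bfb mask = crfbinlog_alt bf bfa bfb mask := by
  have hr : PySem.List.pyRange 0 4 1 = [0, 1, 2, 3] := by decide
  have he : PySem.List.enumerate ([bfa, bf] : List Int) 0 = [(0, bfa), (1, bf)] := rfl
  have ht0 : (0 : Int).toNat = 0 := rfl
  have ht1 : (1 : Int).toNat = 1 := rfl
  have ht2 : (2 : Int).toNat = 2 := rfl
  have ht3 : (3 : Int).toNat = 3 := rfl
  have hA : PySem.Int.bor 0 ((1 : Int) <<< (0 : Nat)) = 1 := by decide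
  have hB : PySem.Int.bor 0 ((1 : Int) <<< (1 : Nat)) = 2 := by decide
  have hC : PySem.Int.bor 1 ((1 : Int) <<< (1 : Nat)) = 3 := by decide
  apply pv_int_ext
  intro k
  simp only [crfbinlog, crfbinlog_alt, hr, he, List.foldl,
    Int.shiftLeft_natCast_right, Int.shiftRight_natCast_right, ht0, ht1, ht2, ht3, hA, hB, hC,
    pv_band_pow2_ne, pv_maskbit_ne]
  by_cases hk : k < 4
  · interval_cases k
    case _ =>
      by_cases h1 : bfa.testBit 0 <;> by_cases h2 : bf.testBit 0 <;>
        simp only [h1, h2, if_true, if_false, ite_true, ite_false] <;>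
      all_goals (
        simp [PySem.List.pyGet?, PySem.List.pyIdx?, apply_ite (fun y : Int => y.testBit 0),
          pv_tb_bor, pv_tb_band, pv_tb_not, pv_tb_one_shl, pv_tb_one, pv_tb_fifteen, pv_tb_zero,
          hA, hB, hC, ht0, ht1, ht2, ht3, h1, h2] <;>
        by_cases m0 : mask.testBit 0 <;> by_cases b0 : bfb.testBit 0 <;>
        by_cases b1 : bfb.testBit 1 <;> by_cases b2 : bfb.testBit 2 <;>
        by_cases b3 : bfb.testBit 3 <;>
          simp [m0, b0, b1, b2, b3, h1, h2, pv_tb_one])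
    case _ =>
      by_cases h1 : bfa.testBit 1 <;> by_cases h2 : bf.testBit 1 <;>
        simp only [h1, h2, if_true, if_false, ite_true, ite_false] <;>
      all_goals (
        simp [PySem.List.pyGet?, PySem.List.pyIdx?, apply_ite (fun y : Int => y.testBit 1),
          pv_tb_bor, pv_tb_band, pv_tb_not, pv_tb_one_shl, pv_tb_one, pv_tb_fifteen, pv_tb_zero,
          hA, hB, hC, ht0, ht1, ht2, ht3, h1, h2] <;>
        by_cases m0 : mask.testBit 1 <;> by_cases b0 : bfb.testBit 0 <;>
        by_cases b1 : bfb.testBit 1 <;> by_cases b2 : bfb.testBit 2 <;>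
        by_cases b3 : bfb.testBit 3 <;>
          simp [m0, b0, b1, b2, b3, h1, h2, pv_tb_one])
    case _ =>
      by_cases h1 : bfa.testBit 2 <;> by_cases h2 : bf.testBit 2 <;>
        simp only [h1, h2, if_true, if_false, ite_true, ite_false] <;>
      all_goals (
        simp [PySem.List.pyGet?, PySem.List.pyIdx?, apply_ite (fun y : Int => y.testBit 2),
          pv_tb_bor, pv_tb_band, pv_tb_not, pv_tb_one_shl, pv_tb_one, pv_tb_fifteen, pv_tb_zero,
          hA, hB, hC, ht0, ht1, ht2, ht3, h1, h2] <;>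
        by_cases m0 : mask.testBit 2 <;> by_cases b0 : bfb.testBit 0 <;>
        by_cases b1 : bfb.testBit 1 <;> by_cases b2 : bfb.testBit 2 <;>
        by_cases b3 : bfb.testBit 3 <;>
          simp [m0, b0, b1, b2, b3, h1, h2, pv_tb_one])
    case _ =>
      by_cases h1 : bfa.testBit 3 <;> by_cases h2 : bf.testBit 3 <;>
        simp only [h1, h2, if_true, if_false, ite_true, ite_false] <;>
      all_goals (
        simp [PySem.List.pyGet?, PySem.List.pyIdx?, apply_ite (fun y : Int => y.testBit 3),
          pv_tb_bor, pv_tb_band, pv_tb_not, pv_tb_one_shl, pv_tb_one, pv_tb_fifteen, pv_tb_zero,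
          hA, hB, hC, ht0, ht1, ht2, ht3, h1, h2] <;>
        by_cases m0 : mask.testBit 3 <;> by_cases b0 : bfb.testBit 0 <;>
        by_cases b1 : bfb.testBit 1 <;> by_cases b2 : bfb.testBit 2 <;>
        by_cases b3 : bfb.testBit 3 <;>
          simp [m0, b0, b1, b2, b3, h1, h2, pv_tb_one])
  · obtain ⟨n, rfl⟩ : ∃ n, k = n + 4 := ⟨k - 4, by omega⟩
    have hs : ∀ i : Nat, i < 4 → ((1 : Int) <<< i).testBit (n + 4) = false := by
      intro i hi
      rw [pv_tb_one_shl]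
      simp
      omega
    have hs1 : (1 : Int).testBit (n + 4) = false := by
      rw [pv_tb_one]
      simp
    have h15 : (15 : Int).testBit (n + 4) = false := by
      rw [pv_tb_fifteen]
      simp
    simp [PySem.List.pyGet?, PySem.List.pyIdx?, apply_ite (fun y : Int => y.testBit (n + 4)),
      pv_tb_bor, pv_tb_band, pv_tb_not, pv_tb_zero, h15, hs1,
      hs 0 (by norm_num), hs 1 (by norm_num), hs 2 (by norm_num), hs 3 (by norm_num)]

-- ===== VERDICT (by name: the statement is the Claim_ definition above) =====
theorem crfbinlog_spec : Claim_equal_crfbinlog := by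
  intro bf bfa bfb mask _
  unfold Spec_crfbinlog
  exact pv_main bf bfa bfb mask
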